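-- pv_equiv track=rewrite | github.com/Vlad88-hub/EGE2026 | task-25/8696.py | f
-- ===== SOURCE A (Python) =====
-- def is_prime(num):
--     if num < 2: return False
--     for i in range(2, int(num ** .5) + 1):
--         if num % i == 0:
--             return False
--     return True
--
-- def f(num):
--     d = set()
--     for i in range(2, int(num ** .5) + 1):
--         if num % i == 0:
--             d |= {i, num // i}
--     if len(d) > 1:
--         M = sum(d)
--         if is_prime(M % 100000):
--             return M
--     return 0
-- ===== SOURCE B (Python) =====
-- def is_prime(num):
--     if num < 2: return False
--     for i in range(2, int(num ** .5) + 1):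
--         if num % i == 0:
--             return False
--     return True
--
-- def f(num):
--     # Factorize num by trial division, then get divisor count (tau) and
--     # divisor sum (sigma) from the closed-form products over the factorization.
--     factors = []
--     m = num
--     i = 2
--     while i * i <= m:
--         if m % i == 0:
--             e = 0
--             while m % i == 0:
--                 m //= i
--                 e += 1
--             factors.append((i, e))
--         i += 1
--     if m > 1:
--         factors.append((m, 1))
--     tau = 1
--     sigma = 1
--     for p, e in factors:
--         tau *= e + 1
--         sigma *= (p ** (e + 1) - 1) // (p - 1)
--     if tau >= 4:
--         M = sigma - 1 - num
--         if is_prime(M % 100000):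
--             return M
--     return 0
-- ===== Notes on version B (the rewrite author's own statement) =====
-- stated objective: alternative
-- what changed: B replaces A's set-of-divisors enumeration (collect all divisor pairs up to sqrt(num), then sum the set) by trial-division prime factorization, computing the divisor count tau and divisor sum sigma from the closed-form products over the (prime, exponent) pairs and returning sigma-1-num when tau>=4 and the primality test passes.
import Mathlib
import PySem

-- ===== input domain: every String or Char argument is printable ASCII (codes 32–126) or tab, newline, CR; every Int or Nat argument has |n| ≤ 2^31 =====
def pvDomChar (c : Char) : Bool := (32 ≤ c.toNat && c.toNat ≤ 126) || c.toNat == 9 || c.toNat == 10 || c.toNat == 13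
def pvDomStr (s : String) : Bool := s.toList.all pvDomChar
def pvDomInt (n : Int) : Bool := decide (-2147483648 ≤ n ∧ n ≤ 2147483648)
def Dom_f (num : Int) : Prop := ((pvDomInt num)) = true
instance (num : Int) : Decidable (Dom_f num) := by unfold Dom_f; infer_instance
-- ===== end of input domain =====

-- B recomputes A's result from the trial-division prime factorization (tau/sigma products)
-- instead of collecting the set of divisor pairs; same cost class, different algorithm.

-- ===== PORT A =====
-- int(x ** .5): Python takes the float square root; for 0 ≤ x ≤ 2^31 the double sqrt is
-- correctly rounded, so int() of it IS the integer square root used here (exact on Dom ∩ Pre_).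
def pySqrt (x : Int) : Int := (Nat.sqrt x.toNat : Int)

-- 'for i in range(...): if num % i == 0: return False / return True' = no i in the range divides num
def isPrime (num : Int) : Bool :=
  if num < 2 then false
  else (PySem.List.pyRange 2 (pySqrt num + 1) 1).all (fun i => !(PySem.Int.mod num i == 0))

def f (num : Int) : Int :=
  let d : PySem.Set Int :=
    (PySem.List.pyRange 2 (pySqrt num + 1) 1).foldl
      (fun s i => if PySem.Int.mod num i == 0
                  then PySem.Set.add (PySem.Set.add s i) (PySem.Int.floordiv num i)
                  else s)
      PySem.Set.empty
  if 1 < PySem.Set.len d then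
    let M := d.sum
    if isPrime (PySem.Int.mod M 100000) then M else 0
  else 0

-- ===== PORT B =====
-- inner 'while m % i == 0: m //= i; e += 1' loop; the '1 ≤ m ∧ 2 ≤ i' part of the guard is a
-- totality guard only (Python would loop forever on m = 0); returns (final m, e)
-- the fuel argument only makes the recursion structural (m strictly drops each step, so
-- fuel = m is always enough); it never changes the computed value
def stripFacF : Nat → Nat → Nat → Nat × Nat
  | 0, m, _ => (m, 0)
  | fuel + 1, m, i =>
    if 2 ≤ i ∧ 1 ≤ m ∧ m % i = 0 then
      let r := stripFacF fuel (m / i) i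
      (r.1, r.2 + 1)
    else (m, 0)

def stripFac (m i : Nat) : Nat × Nat := stripFacF m m i

-- outer 'while i * i <= m' loop of B, plus the trailing 'if m > 1' residual-prime append;
-- fuel = m + 2 bounds the number of iterations (i only grows while i * i ≤ m), totality only
def trialLoopF : Nat → Nat → Nat → List (Nat × Nat)
  | 0, m, _ => if 1 < m then [(m, 1)] else []
  | fuel + 1, m, i =>
    if i * i ≤ m then
      if m % i = 0 then
        (i, (stripFac m i).2) :: trialLoopF fuel (stripFac m i).1 (i + 1)
      else trialLoopF fuel m (i + 1)
    else if 1 < m then [(m, 1)] else []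

def trialLoop (m i : Nat) : List (Nat × Nat) := trialLoopF (m + 2) m i

def f_alt (num : Int) : Int :=
  -- B's loop runs on the Python int num: for num ≥ 0 that is num.toNat, and for num < 0 the
  -- guard i*i <= m is false at once and m > 1 fails, so factors = [], exactly as num.toNat = 0 gives
  let factors := trialLoop num.toNat 2
  let tau : Nat := factors.foldl (fun a pe => a * (pe.2 + 1)) 1
  -- every p in factors is ≥ 2 and divides exactly, so Nat subtraction and division are Python-exact
  let sigma : Nat := factors.foldl (fun a pe => a * ((pe.1 ^ (pe.2 + 1) - 1) / (pe.1 - 1))) 1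
  if 4 ≤ tau then
    let M : Int := (sigma : Int) - 1 - num
    if isPrime (PySem.Int.mod M 100000) then M else 0
  else 0

-- ===== PRECONDITION & SPEC =====
-- Pre_ excludes num < 0, on which A raises TypeError (int() of the complex float num ** .5).
def Pre_f (num : Int) : Prop := 0 ≤ num
instance (num : Int) : Decidable (Pre_f num) := by unfold Pre_f; infer_instance
def pvWitness_f : Int := 12

def Spec_f (num : Int) (out : Int) : Prop := out = f_alt num
instance (num : Int) (out : Int) : Decidable (Spec_f num out) := by unfold Spec_f; infer_instance

-- ===== CLAIM (what is proved, stated in full; the proofs are below) =====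
def Claim_equal_f : Prop := ∀ (num : Int), Dom_f num → Pre_f num → Spec_f num (f num)

-- ===== LEMMAS AND PROOFS =====

-- the proper, non-trivial divisors of n
def propDivs (n : Nat) : Finset Nat := n.divisors.filter (fun d => d ≠ 1 ∧ d ≠ n)

-- B's foldl products are list products
theorem foldl_mul_eq (g : Nat × Nat → Nat) (l : List (Nat × Nat)) (c : Nat) :
    l.foldl (fun a pe => a * g pe) c = c * (l.map g).prod := by
  induction l generalizing c with
  | nil => simp
  | cons a t ih => simp [ih, mul_assoc]

theorem stripFacF_fst_le (fuel m i : Nat) : (stripFacF fuel m i).1 ≤ m := by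
  induction fuel generalizing m with
  | zero => exact le_rfl
  | succ fuel IH =>
    show (stripFacF (fuel + 1) m i).1 ≤ m
    rw [stripFacF]
    by_cases h : 2 ≤ i ∧ 1 ≤ m ∧ m % i = 0
    · rw [if_pos h]
      exact le_trans (IH (m / i)) (Nat.div_le_self _ _)
    · rw [if_neg h]

theorem stripFacF_spec (fuel m i : Nat) (hf : m ≤ fuel) (hm : 1 ≤ m) (hi : 2 ≤ i) :
    m = i ^ (stripFacF fuel m i).2 * (stripFacF fuel m i).1 ∧
    ¬ i ∣ (stripFacF fuel m i).1 ∧ 1 ≤ (stripFacF fuel m i).1 := by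
  induction fuel generalizing m with
  | zero => omega
  | succ fuel IH =>
    rw [stripFacF]
    by_cases h : 2 ≤ i ∧ 1 ≤ m ∧ m % i = 0
    · rw [if_pos h]
      obtain ⟨hi2, hm1, hmod⟩ := h
      have hdvd : i ∣ m := Nat.dvd_of_mod_eq_zero hmod
      have hmi : 1 ≤ m / i := (Nat.one_le_div_iff (by omega)).mpr (Nat.le_of_dvd (by omega) hdvd)
      have hlt : m / i < m := Nat.div_lt_self (by omega) (by omega)
      obtain ⟨h1, h2, h3⟩ := IH (m / i) (by omega) hmi
      refine ⟨?_, h2, h3⟩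
      show m = i ^ ((stripFacF fuel (m / i) i).2 + 1) * (stripFacF fuel (m / i) i).1
      calc m = i * (m / i) := (Nat.mul_div_cancel' hdvd).symm
      _ = i * (i ^ (stripFacF fuel (m / i) i).2 * (stripFacF fuel (m / i) i).1) := by rw [← h1]
      _ = i ^ ((stripFacF fuel (m / i) i).2 + 1) * (stripFacF fuel (m / i) i).1 := by ring
    · rw [if_neg h]
      have hmod : m % i ≠ 0 := by tauto
      exact ⟨by simp, fun hd => hmod (Nat.mod_eq_zero_of_dvd hd), hm⟩

theorem stripFac_spec (m i : Nat) (hm : 1 ≤ m) (hi : 2 ≤ i) :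
    m = i ^ (stripFac m i).2 * (stripFac m i).1 ∧ ¬ i ∣ (stripFac m i).1 ∧ 1 ≤ (stripFac m i).1 :=
  stripFacF_spec m m i le_rfl hm hi

theorem geom_div (p e : Nat) (hp : 2 ≤ p) :
    (p ^ (e + 1) - 1) / (p - 1) = ∑ k ∈ Finset.range (e + 1), p ^ k := by
  have hp1 : 1 ≤ p ^ (e + 1) := Nat.one_le_pow _ _ (by omega)
  have hmul : (∑ k ∈ Finset.range (e + 1), p ^ k) * (p - 1) = p ^ (e + 1) - 1 := by
    zify [hp1, show 1 ≤ p by omega]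
    exact_mod_cast geom_sum_mul (p : Int) (e + 1)
  rw [← hmul, Nat.mul_div_cancel _ (by omega : 0 < p - 1)]

theorem trialLoop_term (m i : Nat) (h : ¬ i * i ≤ m) (hm : 1 ≤ m) (hi : 2 ≤ i)
    (hinv : ∀ p, p.Prime → p ∣ m → i ≤ p) :
    ((if 1 < m then [(m, 1)] else []).map (fun pe => pe.2 + 1)).prod = m.divisors.card ∧
    ((if 1 < m then [(m, 1)] else []).map (fun pe => (pe.1 ^ (pe.2 + 1) - 1) / (pe.1 - 1))).prod
      = ∑ d ∈ m.divisors, d := by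
  by_cases hm1 : 1 < m
  · rw [if_pos hm1]
    have hp := Nat.minFac_prime (by omega : m ≠ 1)
    have hle : i ≤ m.minFac := hinv _ hp (Nat.minFac_dvd m)
    have hprime : m.Prime := by
      by_contra hnp
      have hsq := Nat.minFac_sq_le_self (by omega : 0 < m) hnp
      rw [pow_two] at hsq
      exact h (le_trans (Nat.mul_le_mul hle hle) hsq)
    have hne : (1 : ℕ) ≠ m := by omega
    constructor
    · simp only [List.map_cons, List.map_nil, List.prod_cons, List.prod_nil, mul_one]
      rw [Nat.Prime.divisors hprime, Finset.card_pair hne]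
    · simp only [List.map_cons, List.map_nil, List.prod_cons, List.prod_nil, mul_one]
      rw [Nat.Prime.divisors hprime, Finset.sum_pair hne, geom_div m 1 hprime.two_le]
      rw [Finset.sum_range_succ, Finset.sum_range_succ, Finset.sum_range_zero]
      simp
  · rw [if_neg hm1]
    have : m = 1 := by omega
    subst this
    simp [Nat.divisors_one]

theorem trialLoop_spec_aux (k : Nat) : ∀ (m i : Nat), m + 2 - i ≤ k →
    1 ≤ m → 2 ≤ i → (∀ p, p.Prime → p ∣ m → i ≤ p) →
    ((trialLoopF k m i).map (fun pe => pe.2 + 1)).prod = m.divisors.card ∧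
    ((trialLoopF k m i).map (fun pe => (pe.1 ^ (pe.2 + 1) - 1) / (pe.1 - 1))).prod = ∑ d ∈ m.divisors, d := by
  induction k with
  | zero =>
    intro m i hk hm hi hinv
    have hii : ¬ i * i ≤ m := by
      intro hcon
      have h1 : i ≤ i * i := Nat.le_mul_of_pos_left i (by omega)
      omega
    rw [trialLoopF]
    exact trialLoop_term m i hii hm hi hinv
  | succ k IH =>
    intro m i hk hm hi hinv
    rw [trialLoopF]
    by_cases h : i * i ≤ m
    · rw [if_pos h]
      by_cases hmod : m % i = 0
      · rw [if_pos hmod]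
        have hdvd : i ∣ m := Nat.dvd_of_mod_eq_zero hmod
        obtain ⟨heq, hndvd, hm1⟩ := stripFac_spec m i hm hi
        have hiprime : i.Prime := by
          have h1 : i ≠ 1 := by omega
          have hmf := Nat.minFac_prime h1
          have hle : i ≤ i.minFac := hinv _ hmf ((Nat.minFac_dvd i).trans hdvd)
          have hge : i.minFac ≤ i := Nat.minFac_le (by omega)
          have heqi : i.minFac = i := by omega
          rwa [heqi] at hmf
        have he1 : 1 ≤ (stripFac m i).2 := by
          by_contra h0
          have h00 : (stripFac m i).2 = 0 := by omega
          rw [h00, pow_zero, one_mul] at heq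
          exact hndvd (heq ▸ hdvd)
        have hcop : (i ^ (stripFac m i).2).Coprime (stripFac m i).1 :=
          Nat.Coprime.pow_left _ ((Nat.Prime.coprime_iff_not_dvd hiprime).mpr hndvd)
        have hinv' : ∀ p, p.Prime → p ∣ (stripFac m i).1 → i + 1 ≤ p := by
          intro p hp hpd
          have hpm : p ∣ m := by
            rw [heq]; exact hpd.trans (dvd_mul_left _ _)
          have hge : i ≤ p := hinv p hp hpm
          rcases Nat.lt_or_ge i p with hlt | hge2
          · omega
          · have hpi : p = i := by omega
            exact absurd (hpi ▸ hpd) hndvd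
        have hles : (stripFac m i).1 ≤ m := stripFacF_fst_le m m i
        obtain ⟨ihτ, ihσ⟩ := IH (stripFac m i).1 (i + 1) (by omega) hm1 (by omega) hinv'
        have hcardpp : (i ^ (stripFac m i).2).divisors.card = (stripFac m i).2 + 1 := by
          rw [← ArithmeticFunction.sigma_zero_apply]
          exact ArithmeticFunction.sigma_zero_apply_prime_pow hiprime
        have hsumpp : (∑ d ∈ (i ^ (stripFac m i).2).divisors, d)
            = ∑ j ∈ Finset.range ((stripFac m i).2 + 1), i ^ j := by
          rw [← ArithmeticFunction.sigma_one_apply]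
          exact ArithmeticFunction.sigma_one_apply_prime_pow hiprime
        constructor
        · simp only [List.map_cons, List.prod_cons, ihτ]
          conv_rhs => rw [heq]
          rw [Nat.Coprime.card_divisors_mul hcop, hcardpp]
        · simp only [List.map_cons, List.prod_cons, ihσ]
          conv_rhs => rw [heq]
          rw [Nat.Coprime.sum_divisors_mul hcop, hsumpp, geom_div i _ hiprime.two_le]
      · rw [if_neg hmod]
        refine IH m (i + 1) (by omega) hm (by omega) ?_
        intro p hp hpd
        have hge : i ≤ p := hinv p hp hpd
        rcases Nat.lt_or_ge i p with hlt | hge2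
        · omega
        · have hpi : p = i := by omega
          subst hpi
          exact absurd (Nat.mod_eq_zero_of_dvd hpd) hmod
    · rw [if_neg h]
      exact trialLoop_term m i h hm hi hinv

theorem trialLoop_spec (m i : Nat) :
    1 ≤ m → 2 ≤ i → (∀ p, p.Prime → p ∣ m → i ≤ p) →
    ((trialLoop m i).map (fun pe => pe.2 + 1)).prod = m.divisors.card ∧
    ((trialLoop m i).map (fun pe => (pe.1 ^ (pe.2 + 1) - 1) / (pe.1 - 1))).prod = ∑ d ∈ m.divisors, d :=
  trialLoop_spec_aux (m + 2) m i (by omega)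

theorem mem_setFold (num : Int) (l : List Int) (s : PySem.Set Int) (x : Int) :
    (x ∈ l.foldl (fun s i => if PySem.Int.mod num i == 0
                  then PySem.Set.add (PySem.Set.add s i) (PySem.Int.floordiv num i)
                  else s) s) ↔
    x ∈ s ∨ ∃ i ∈ l, PySem.Int.mod num i = 0 ∧ (x = i ∨ x = PySem.Int.floordiv num i) := by
  induction l generalizing s with
  | nil => simp
  | cons a t ih =>
    simp only [List.foldl_cons]
    by_cases hc : PySem.Int.mod num a = 0
    · rw [if_pos (by simpa using hc), ih]
      simp only [PySem.Set.mem_add, List.mem_cons]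
      constructor
      · rintro (((hx | hx) | hx) | ⟨i, hi, hmod, hx⟩)
        · exact Or.inl hx
        · exact Or.inr ⟨a, Or.inl rfl, hc, Or.inl hx⟩
        · exact Or.inr ⟨a, Or.inl rfl, hc, Or.inr hx⟩
        · exact Or.inr ⟨i, Or.inr hi, hmod, hx⟩
      · rintro (hx | ⟨i, (rfl | hi), hmod, hx⟩)
        · exact Or.inl (Or.inl (Or.inl hx))
        · rcases hx with hx | hx
          · exact Or.inl (Or.inl (Or.inr hx))
          · exact Or.inl (Or.inr hx)
        · exact Or.inr ⟨i, hi, hmod, hx⟩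
    · rw [if_neg (by simpa using hc), ih]
      simp only [List.mem_cons]
      constructor
      · rintro (hx | ⟨i, hi, hmod, hx⟩)
        · exact Or.inl hx
        · exact Or.inr ⟨i, Or.inr hi, hmod, hx⟩
      · rintro (hx | ⟨i, (rfl | hi), hmod, hx⟩)
        · exact Or.inl hx
        · exact absurd hmod hc
        · exact Or.inr ⟨i, hi, hmod, hx⟩

theorem nodup_setFold (num : Int) (l : List Int) (s : PySem.Set Int) (hs : s.Nodup) :
    (l.foldl (fun s i => if PySem.Int.mod num i == 0
                  then PySem.Set.add (PySem.Set.add s i) (PySem.Int.floordiv num i)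
                  else s) s).Nodup := by
  induction l generalizing s with
  | nil => exact hs
  | cons a t ih =>
    simp only [List.foldl_cons]
    split
    · exact ih _ (PySem.Set.nodup_add _ _ (PySem.Set.nodup_add _ _ hs))
    · exact ih _ hs

theorem mem_iff_propDiv (n : Nat) (x : Int) :
    (∃ i, (2 ≤ i ∧ i < (Nat.sqrt n : Int) + 1) ∧ PySem.Int.mod (n : Int) i = 0 ∧
      (x = i ∨ x = PySem.Int.floordiv (n : Int) i)) ↔
    ∃ d ∈ propDivs n, x = (d : Int) := by
  constructor
  · rintro ⟨i, ⟨h2, hlt⟩, hmod, hx⟩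
    have hdvdZ : i ∣ (n : Int) := (PySem.Int.mod_eq_zero_iff_dvd _ _).mp hmod
    obtain ⟨d0, rfl⟩ : ∃ d0 : ℕ, i = (d0 : Int) := ⟨i.toNat, by omega⟩
    have hd02 : 2 ≤ d0 := by exact_mod_cast h2
    have hd0s : d0 ≤ Nat.sqrt n := by
      have : (d0 : Int) ≤ (Nat.sqrt n : Int) := by omega
      exact_mod_cast this
    have hdvd : d0 ∣ n := by exact_mod_cast hdvdZ
    have hn4 : 4 ≤ n := by
      have : 2 ≤ Nat.sqrt n := le_trans hd02 hd0s
      have := Nat.le_sqrt.mp this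
      omega
    have hn0 : n ≠ 0 := by omega
    rcases hx with rfl | rfl
    · refine ⟨d0, ?_, rfl⟩
      simp only [propDivs, Finset.mem_filter, Nat.mem_divisors]
      have hlt2 : d0 < n := lt_of_le_of_lt hd0s (Nat.sqrt_lt_self (by omega))
      exact ⟨⟨hdvd, hn0⟩, by omega, by omega⟩
    · refine ⟨n / d0, ?_, by rw [PySem.Int.floordiv_natCast]⟩
      simp only [propDivs, Finset.mem_filter, Nat.mem_divisors]
      have hge : d0 ≤ n / d0 := (Nat.le_div_iff_mul_le (by omega)).mpr (Nat.le_sqrt.mp hd0s)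
      have hlt2 : n / d0 < n := Nat.div_lt_self (by omega) (by omega)
      exact ⟨⟨Nat.div_dvd_of_dvd hdvd, hn0⟩, by omega, by omega⟩
  · rintro ⟨d, hd, rfl⟩
    simp only [propDivs, Finset.mem_filter, Nat.mem_divisors] at hd
    obtain ⟨⟨hdvd, hn0⟩, hd1, hdn⟩ := hd
    have hdpos : 0 < d := Nat.pos_of_dvd_of_pos hdvd (by omega)
    have hd2 : 2 ≤ d := by omega
    have hdltn : d < n := lt_of_le_of_ne (Nat.le_of_dvd (by omega) hdvd) hdn
    by_cases hcase : d ≤ Nat.sqrt n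
    · refine ⟨(d : Int), ⟨by exact_mod_cast hd2, by omega⟩, ?_, Or.inl rfl⟩
      rw [PySem.Int.mod_eq_zero_iff_dvd]
      exact_mod_cast hdvd
    · push_neg at hcase
      have hcd : n / d * d = n := Nat.div_mul_cancel hdvd
      have hdd : n < d * d := Nat.sqrt_lt.mp hcase
      have hcled : n / d ≤ d := by
        by_contra hcon
        push_neg at hcon
        have h2 : (d + 1) * d ≤ n := by
          rw [← hcd]
          exact Nat.mul_le_mul_right d (by omega)
        nlinarith
      have hcs : n / d ≤ Nat.sqrt n := Nat.le_sqrt.mpr (by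
        calc n / d * (n / d) ≤ n / d * d := Nat.mul_le_mul_left _ hcled
        _ = n := hcd)
      have hc1 : n / d ≠ 1 := by
        intro h1
        rw [h1, one_mul] at hcd
        exact hdn hcd
      have hc0 : n / d ≠ 0 := by
        intro h0
        rw [h0, zero_mul] at hcd
        omega
      have h2c : 2 ≤ n / d := (Nat.two_le_iff _).mpr ⟨hc0, hc1⟩
      have hltc : n / d < Nat.sqrt n + 1 := by exact Nat.lt_succ_of_le hcs
      have hc2 : (2 : Int) ≤ ((n / d : ℕ) : Int) := by exact_mod_cast h2c
      have hcs' : ((n / d : ℕ) : Int) < (Nat.sqrt n : Int) + 1 := by exact_mod_cast hltc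
      refine ⟨((n / d : ℕ) : Int), ⟨hc2, hcs'⟩, ?_, Or.inr ?_⟩
      · rw [PySem.Int.mod_eq_zero_iff_dvd]
        exact_mod_cast Nat.div_dvd_of_dvd hdvd
      · rw [PySem.Int.floordiv_natCast]
        congr 1
        rw [Nat.div_div_self hdvd hn0]

theorem partition_divisors (n : Nat) (hn : 2 ≤ n) :
    n.divisors.card = (propDivs n).card + 2 ∧
    (∑ d ∈ n.divisors, d) = (∑ d ∈ propDivs n, d) + 1 + n := by
  have hn0 : n ≠ 0 := by omega
  have hfilt : n.divisors.filter (fun d => ¬(d ≠ 1 ∧ d ≠ n)) = {1, n} := by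
    ext d
    simp only [Finset.mem_filter, Nat.mem_divisors, Finset.mem_insert, Finset.mem_singleton]
    constructor
    · rintro ⟨⟨hdvd, _⟩, hnot⟩
      by_cases h1 : d = 1
      · exact Or.inl h1
      · right
        by_contra h2
        exact hnot ⟨h1, h2⟩
    · rintro (rfl | rfl)
      · exact ⟨⟨one_dvd n, hn0⟩, by simp⟩
      · exact ⟨⟨dvd_rfl, hn0⟩, by simp⟩
  have h1n : (1 : ℕ) ≠ n := by omega
  have hcard := Finset.filter_card_add_filter_neg_card_eq_card
    (s := n.divisors) (p := fun d => d ≠ 1 ∧ d ≠ n)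
  have hsum := Finset.sum_filter_add_sum_filter_not n.divisors (fun d => d ≠ 1 ∧ d ≠ n) (fun d => d)
  rw [hfilt] at hcard hsum
  rw [Finset.card_pair h1n] at hcard
  rw [Finset.sum_pair h1n] at hsum
  constructor
  · unfold propDivs
    omega
  · unfold propDivs
    omega

theorem list_sum_toFinset (l : List Int) (h : l.Nodup) : (l.toFinset).sum id = l.sum := by
  induction l with
  | nil => simp
  | cons a t ih => simp_all [List.toFinset_cons, Finset.sum_insert]


theorem A_char (n : Nat) :
    f (n : Int) =
      (if 1 < ((propDivs n).card : Int) then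
        (if isPrime (PySem.Int.mod ((∑ d ∈ propDivs n, d : ℕ) : Int) 100000) then
          ((∑ d ∈ propDivs n, d : ℕ) : Int) else 0)
      else 0) := by
  have hsq : pySqrt (n : Int) = (Nat.sqrt n : Int) := by simp [pySqrt]
  simp only [f, hsq]
  set S := (PySem.List.pyRange 2 ((Nat.sqrt n : Int) + 1) 1).foldl
      (fun s i => if PySem.Int.mod (n : Int) i == 0
                  then PySem.Set.add (PySem.Set.add s i) (PySem.Int.floordiv (n : Int) i)
                  else s)
      PySem.Set.empty with hS
  have hmem : ∀ x, x ∈ S ↔ ∃ d ∈ propDivs n, x = (d : Int) := by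
    intro x
    rw [hS, mem_setFold]
    have hemp : x ∈ (PySem.Set.empty : PySem.Set Int) ↔ False := by
      simp [PySem.Set.empty]
    rw [← mem_iff_propDiv n x]
    simp only [hemp, false_or, PySem.List.mem_pyRange_one]
  have hnd : S.Nodup := nodup_setFold _ _ _ (by simp [PySem.Set.empty])
  have hfin : S.toFinset = (propDivs n).image (fun d : ℕ => (d : Int)) := by
    ext x
    simp only [List.mem_toFinset, hmem x, Finset.mem_image]
    constructor
    · rintro ⟨d, hd, rfl⟩; exact ⟨d, hd, rfl⟩
    · rintro ⟨d, hd, hdx⟩; exact ⟨d, hd, hdx.symm⟩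
  have hinj : ∀ a ∈ propDivs n, ∀ b ∈ propDivs n, (a : Int) = (b : Int) → a = b := by
    intro a _ b _ h; exact_mod_cast h
  have hlenN : S.length = (propDivs n).card := by
    rw [← List.toFinset_card_of_nodup hnd, hfin, Finset.card_image_of_injOn hinj]
  have hlen : PySem.Set.len S = ((propDivs n).card : Int) := by
    simp [PySem.Set.len, hlenN]
  have hsum : S.sum = ((∑ d ∈ propDivs n, d : ℕ) : Int) := by
    rw [← list_sum_toFinset S hnd, hfin, Finset.sum_image hinj]
    push_cast
    rfl
  rw [hlen, hsum]

theorem B_char (n : Nat) (hn : 1 ≤ n) :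
    f_alt (n : Int) =
      (if 4 ≤ n.divisors.card then
        (if isPrime (PySem.Int.mod (((∑ d ∈ n.divisors, d : ℕ) : Int) - 1 - (n : Int)) 100000) then
          ((∑ d ∈ n.divisors, d : ℕ) : Int) - 1 - (n : Int) else 0)
      else 0) := by
  obtain ⟨hτ, hσ⟩ := trialLoop_spec n 2 hn (by omega) (fun p hp _ => hp.two_le)
  simp only [f_alt, Int.toNat_natCast]
  rw [foldl_mul_eq, foldl_mul_eq, one_mul, one_mul, hτ, hσ]

-- ===== VERDICT (by name: the statement is the Claim_ definition above) =====
theorem f_spec : Claim_equal_f := by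
  intro num _ hpre
  unfold Spec_f
  obtain ⟨n, rfl⟩ : ∃ n : ℕ, num = (n : Int) := ⟨num.toNat, by unfold Pre_f at hpre; omega⟩
  rcases Nat.eq_zero_or_pos n with hn0 | hn1
  · subst hn0
    have ht : trialLoop 0 2 = [] := by decide
    have hB : f_alt ((0 : ℕ) : Int) = 0 := by
      norm_num [f_alt, ht]
    rw [A_char, hB]
    norm_num [propDivs, Nat.divisors_zero]
  · rw [A_char, B_char n hn1]
    rcases Nat.lt_or_ge n 2 with hn2 | hn2
    · have hn1' : n = 1 := by omega
      subst hn1'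
      norm_num [propDivs, Nat.divisors_one]
    · obtain ⟨hcard, hsum⟩ := partition_divisors n hn2
      have hcond : (1 < ((propDivs n).card : Int)) ↔ (4 ≤ n.divisors.card) := by omega
      have hM : ((∑ d ∈ propDivs n, d : ℕ) : Int) = ((∑ d ∈ n.divisors, d : ℕ) : Int) - 1 - (n : Int) := by
        have h' : ((∑ d ∈ n.divisors, d : ℕ) : Int) = ((∑ d ∈ propDivs n, d : ℕ) : Int) + 1 + (n : Int) := by
          exact_mod_cast hsum
        omega
      rw [hM]
      exact if_congr hcond rfl rfl
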